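/-
  THE SEGMENTS OF `DGifSetupDecompress` (dgif_lib.c:813-852, 106180H … 106354H, 102 instructions; contract: Gif/Spec/Lzw.lean): the
  assertions at its cut points, the segment claims, and the COMPOSITION (segments ⇒ the contract), proved here.

      unit                        from      to                       instructions   calls
      DGifSetupDecompress.P       106180H   1061C8H                            15   —
      DGifSetupDecompress.1       1061C8H   106205H | 10633AH                  24   InternalRead; load8, store4
      DGifSetupDecompress.2       106205H   10632DH                            45   store1, store4, store8
      DGifSetupDecompress.3       10632DH   10633AH                             9   store4 (the loop `Prefix[i] = NO_SUCH_CODE`, walked inside)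
      DGifSetupDecompress.E       10633AH   ret                                 9   —

  THE FRAME (Gif/Frames.lean, c/gif/gif_FRAMES.txt): six pushes (r15 r14 r13 r12 rbp rbx) and `sub rsp, 72`: `rsp = RA − 120` in the
  body; the protected frame's base is `RA − 120`, 64 bytes, the object `CodeSize` (1 byte) at `base + 32 = RA − 88`; `r13` holds the
  shadow index `(RA − 120) >> 3` from the prologue to the epilogue.
-/
import Gif.Spec.Lzw
import Gif.LabelsAt
namespace Gif.Spec
open X86 X86.User Asan ProgX.Base ProgX.Base.Spec

namespace DGifSetupDecompress

/-- The active frames inside the body: the function's own protected frame (`base = RA − 120`), innermost. -/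
abbrev framesIn (frames : List (Nat × FrameLayout)) (e : State) : List (Nat × FrameLayout) :=
  ((e.reg .rsp).toNat - 120, Gif.Frames.DGifSetupDecompress) :: frames

/-- **IN THE BODY of `DGifSetupDecompress`**, at the address `cut`, inside the call that was entered at the state `e` (return address
`ret`) with the function's precondition: what holds at EVERY cut between the prologue and the `ret`. -/
structure Body (cut : Word) (H : Heap) (rest : List Obj) (frames : List (Nat × FrameLayout)) (F : Forest) (R : Rd) (u₀ e : State)
    (ret : Word) (v : State) : Prop where
  /-- the function was entered at `e` … -/
  entry : AtEntry (conv u₀) Gif.L.DGifSetupDecompress.entry (DGifSetupDecompress.spec H rest frames F R).frame ret e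
  /-- … with its precondition -/
  pre : (DGifSetupDecompress.spec H rest frames F R).pre e
  rip : v.rip = cut
  /-- six pushes and `sub rsp, 72` -/
  rsp : v.reg .rsp = e.reg .rsp - 120
  /-- `mov r13, rsp ; shr r13, 3` (106191H, 1061AEH): the shadow index of the frame; the epilogue's store uses it -/
  r13 : v.reg .r13 = (e.reg .rsp - 120) >>> 3
  /-- the saved registers, in push order (all six callee-saved registers are pushed): the pops 106349H … 106351H restore them -/
  slot_r15 : v.mem.readLE (e.reg .rsp - 8) 8 = (e.reg .r15).toNat
  slot_r14 : v.mem.readLE (e.reg .rsp - 16) 8 = (e.reg .r14).toNat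
  slot_r13 : v.mem.readLE (e.reg .rsp - 24) 8 = (e.reg .r13).toNat
  slot_r12 : v.mem.readLE (e.reg .rsp - 32) 8 = (e.reg .r12).toNat
  slot_rbp : v.mem.readLE (e.reg .rsp - 40) 8 = (e.reg .rbp).toNat
  slot_rbx : v.mem.readLE (e.reg .rsp - 48) 8 = (e.reg .rbx).toNat
  /-- the return-address slot `[RA, RA + 8)` still holds `ret` (no store of the function or of a callee goes there): the `ret`
  at 106353H pops it -/
  slot_ra : UInt64.ofNat (v.mem.readLE (e.reg .rsp) 8) = ret
  /-- the heap's invariant with the OWN frame pushed, the clean stack ending at the present stack pointer -/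
  inv : HeapInv H rest (framesIn frames e) ((e.reg .rsp).toNat - 120) v.mem
  /-- the state invariant, same heap, same forest -/
  ok : GifOK H F R v.mem
  /-- the reader did not go back -/
  rem : rem R v.mem ≤ rem R e.mem
  /-- nothing was written but the function's stack, the frame's 8 shadow bytes and the contract's windows -/
  same : Mem.SameExcept
    [⟨(e.reg .rsp).toNat - 304, (e.reg .rsp).toNat⟩,
     shadowSpan ((e.reg .rsp).toNat - 120) ((e.reg .rsp).toNat - 56),
     ⟨F.pv + 8, F.pv + 56⟩,
     ⟨F.pv + 88, F.pv + 89⟩,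
     ⟨F.pv + 8536, F.pv + 24920⟩,
     ⟨F.gif + 96, F.gif + 100⟩,
     ⟨R.cur, R.cur + 8⟩] e.mem v.mem
  code : (conv u₀).code.In v.mem
  abi : (conv u₀).inv v

/-- **AFTER THE PROLOGUE** (at 1061C8H, `lea rdi, [rdi + 0x70]`: l.817 `Private = GifFile->Private`): `Body`; `rdi` and `rbx` both
hold `gif` (`mov rbx, rdi` at 10618EH; the `lea` still reads `rdi`); no input byte was read yet. -/
structure AfterP (H : Heap) (rest : List Obj) (frames : List (Nat × FrameLayout)) (F : Forest) (R : Rd) (u₀ e : State)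
    (ret : Word) (v : State) : Prop where
  body : Body Gif.L.DGifSetupDecompress.at_1061c8 H rest frames F R u₀ e ret v
  /-- the argument register is untouched -/
  rdi : v.reg .rdi = e.reg .rdi
  /-- `rbx = gif` -/
  rbx : v.reg .rbx = e.reg .rdi
  /-- the reader is where it was (the success return needs "exactly one byte") -/
  remEq : Gif.Spec.rem R v.mem = Gif.Spec.rem R e.mem

/-- **BEFORE THE STORE BLOCK** (at 106205H, `lea rdi, [r12 + 0x58]`: l.834 `Private->Buf[0] = 0`): `Body`; InternalRead delivered the
one byte `CodeSize`, and the test l.828 accepted it: `2 ≤ CodeSize ≤ 8`; `ebp` and `r15d` hold it zero-extended (1061EFH, 1061F5H);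
`r12 = Private` (1061D1H). NO store to pv was made yet; exactly one byte was consumed. -/
structure AtStores (H : Heap) (rest : List Obj) (frames : List (Nat × FrameLayout)) (F : Forest) (R : Rd) (u₀ e : State)
    (ret : Word) (v : State) : Prop where
  body : Body Gif.L.DGifSetupDecompress.at_106205 H rest frames F R u₀ e ret v
  /-- `r12 = Private` -/
  r12 : (v.reg .r12).toNat = F.pv
  /-- `rbp` = `CodeSize`, zero-extended, in the accepted range -/
  size_lo : 2 ≤ (v.reg .rbp).toNat
  size_hi : (v.reg .rbp).toNat ≤ 8
  /-- `r15` holds the same byte (the shift count of l.836) -/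
  r15 : v.reg .r15 = v.reg .rbp
  /-- exactly one byte was consumed -/
  rem1 : Gif.Spec.rem R v.mem + 1 = Gif.Spec.rem R e.mem

/-- **AT THE HEAD OF THE LOOP l.847** (at 10632DH, `cmp ebx, 0xfff`), ENTERED: `i = ebx = 0`, `r12 = &Private->Prefix[0] =
pv + 8536` (1062D8H); the store block is done: **`LZOK` holds** (`BitsPerPixel = CodeSize ≤ 8`, `ClearCode = 1 << CodeSize ≤ 256`,
`EOFCode = ClearCode + 1`, `RunningCode = ClearCode + 2`, `RunningBits = CodeSize + 1 ≤ 9`, `StackPtr = 0`, `CrntShiftState = 0`).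
The loop's stores go to `Prefix` only: they keep it (`LZOK.frame`). -/
structure AtLoop (H : Heap) (rest : List Obj) (frames : List (Nat × FrameLayout)) (F : Forest) (R : Rd) (u₀ e : State)
    (ret : Word) (v : State) : Prop where
  body : Body Gif.L.DGifSetupDecompress.at_10632d H rest frames F R u₀ e ret v
  /-- `r12 = Private->Prefix` -/
  r12 : (v.reg .r12).toNat = F.pv + 8536
  /-- `i = 0` (`mov ebx, 0`: the whole register is 0) -/
  rbx : v.reg .rbx = 0
  /-- the LZW field ranges, established by the store block -/
  lz : LZOK v.mem F.pv
  /-- exactly one byte was consumed -/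
  rem1 : Gif.Spec.rem R v.mem + 1 = Gif.Spec.rem R e.mem

/-- **BEFORE THE EPILOGUE** (at 10633AH, the store that clears the frame's shadow): `Body`, the result in `eax`, and the contract's
postcondition stated of the present memory (the epilogue clears 8 shadow bytes and pops: neither changes what these clauses read). -/
structure Done (H : Heap) (rest : List Obj) (frames : List (Nat × FrameLayout)) (F : Forest) (R : Rd) (u₀ e : State)
    (ret : Word) (v : State) : Prop where
  body : Body Gif.L.DGifSetupDecompress.at_10633a H rest frames F R u₀ e ret v
  /-- GIF_OK or GIF_ERROR (`mov eax, imm32`) -/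
  res : IsBool v
  /-- GIF_OK: the LZW field ranges hold, exactly one byte was consumed -/
  ok1 : (v.reg .rax).toNat = 1 → LZOK v.mem F.pv ∧ Gif.Spec.rem R v.mem + 1 = Gif.Spec.rem R e.mem

/-- **Segment P** (the prologue, 106180H … 1061C8H, 15 instructions): six pushes, `sub rsp, 72`, `rbx = gif`, the frame's three
header words, the shadow index in `r13`, the two poison stores. -/
def SegP (Lay : Layout) (μ : Microarch) (u₀ : State) : Prop :=
  ∀ (H : Heap) (rest : List Obj) (frames : List (Nat × FrameLayout)) (F : Forest) (R : Rd) (e : State) (ret : Word),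
    AtEntry (conv u₀) Gif.L.DGifSetupDecompress.entry (DGifSetupDecompress.spec H rest frames F R).frame ret e →
    (DGifSetupDecompress.spec H rest frames F R).pre e →
    ReachVia Lay μ WayInv e (AfterP H rest frames F R u₀ e ret)

/-- **Segment 1** (1061C8H … 106205H, with the two error arms 1062E6H … 106314H; 24 instructions): the checked load of
`GifFile->Private` (l.817), `InternalRead(gif, &CodeSize, 1)` (l.820) into the frame's object; a short read: the checked store of
`gif.Error` (l.822), `eax = 0`, to the epilogue; else the test l.828 `CodeSize − 2 > 6` (unsigned): rejected: `gif.Error` (l.829),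
`eax = 0`, to the epilogue; accepted: to the store block. NO store to pv. -/
def Seg1 (Lay : Layout) (μ : Microarch) (u₀ : State) : Prop :=
  ∀ (H : Heap) (rest : List Obj) (frames : List (Nat × FrameLayout)) (F : Forest) (R : Rd) (e : State) (ret : Word) (v : State),
    AfterP H rest frames F R u₀ e ret v →
    ReachVia Lay μ WayInv v (fun w => AtStores H rest frames F R u₀ e ret w ∨ Done H rest frames F R u₀ e ret w)

/-- **Segment 2** (the store block, 106205H … 1062E6H, 45 instructions, no contract call): the checked stores l.834-844 `Buf[0] = 0`,
`BitsPerPixel`, `ClearCode`, `EOFCode`, `RunningCode`, `RunningBits`, `MaxCode1`, `StackPtr`, `LastCode`, `CrntShiftState`,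
`CrntShiftDWord` (each inside the live object `pv`: `Owns.liveIn`), `r12 = Prefix`, `ebx = 0`, the jump to the loop's head. -/
def Seg2 (Lay : Layout) (μ : Microarch) (u₀ : State) : Prop :=
  ∀ (H : Heap) (rest : List Obj) (frames : List (Nat × FrameLayout)) (F : Forest) (R : Rd) (e : State) (ret : Word) (v : State),
    AtStores H rest frames F R u₀ e ret v →
    ReachVia Lay μ WayInv v (AtLoop H rest frames F R u₀ e ret)

/-- **Segment 3** (the loop l.847-848, 106314H … 10633AH, 9 instructions a round; 4096 rounds, walked inside with the loop tactic:
invariant `ebx = i ≤ 4096`, measure `4096 − i`): the checked store `Prefix[i] = NO_SUCH_CODE`, `i < 4096` (`prefixLive`); at the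
exit `eax = 1`. -/
def Seg3 (Lay : Layout) (μ : Microarch) (u₀ : State) : Prop :=
  ∀ (H : Heap) (rest : List Obj) (frames : List (Nat × FrameLayout)) (F : Forest) (R : Rd) (e : State) (ret : Word) (v : State),
    AtLoop H rest frames F R u₀ e ret v →
    ReachVia Lay μ WayInv v (Done H rest frames F R u₀ e ret)

/-- **Segment E** (the epilogue, 10633AH … ret, 9 instructions): the 8-byte store that clears the frame's shadow, `add rsp, 72`, six
pops, `ret`. -/
def SegE (Lay : Layout) (μ : Microarch) (u₀ : State) : Prop :=
  ∀ (H : Heap) (rest : List Obj) (frames : List (Nat × FrameLayout)) (F : Forest) (R : Rd) (e : State) (ret : Word) (v : State),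
    Done H rest frames F R u₀ e ret v →
    ReachVia Lay μ WayInv v (Returned (conv u₀) (DGifSetupDecompress.spec H rest frames F R) e ret)

/-- **The composition of `DGifSetupDecompress`**: the five segments chain into the function's contract. -/
theorem compose {Lay : Layout} {μ : Microarch} {u₀ : State} (hP : SegP Lay μ u₀) (h1 : Seg1 Lay μ u₀) (h2 : Seg2 Lay μ u₀)
    (h3 : Seg3 Lay μ u₀) (hE : SegE Lay μ u₀) :
    ∀ (H : Heap) (rest : List Obj) (frames : List (Nat × FrameLayout)) (F : Forest) (R : Rd),
      Calls Lay μ WayInv (conv u₀) Gif.L.DGifSetupDecompress.entry (DGifSetupDecompress.spec H rest frames F R) := by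
  intro H rest frames F R e ret he hp
  refine (hP H rest frames F R e ret he hp).trans ?_
  intro v hv
  refine (h1 H rest frames F R e ret v hv).trans ?_
  intro w hw
  rcases hw with hstores | hdone
  · refine (h2 H rest frames F R e ret w hstores).trans ?_
    intro x hx
    refine (h3 H rest frames F R e ret x hx).trans ?_
    intro y hy
    exact hE H rest frames F R e ret y hy
  · exact hE H rest frames F R e ret w hdone

end DGifSetupDecompress

end Gif.Spec
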